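-- pv_equiv track=rewrite | github.com/cvanoort/USDrugUseAnalysis | Report1/Code/drugPopularity.py | countKey
-- ===== SOURCE A (Python) =====
-- def countKey(key,listDataDicts):
--     outDict = {}
--     for row in listDataDicts:
--         try:
--             outDict[row[key]] += 1
--
--         except KeyError:
--             outDict[row[key]] = 1
--
--     return outDict
-- ===== SOURCE B (Python) =====
-- def countKey(key, listDataDicts):
--     # Build the flat list of key-values first, then count each distinct value
--     # (first-occurrence order) by scanning the list.
--     vals = [row[key] for row in listDataDicts]
--     return {v: vals.count(v) for v in dict.fromkeys(vals)}
-- ===== Notes on version B (the rewrite author's own statement) =====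
-- stated objective: alternative
-- what changed: Replaces A's single accumulating try/except counting pass with a build-then-scan shape: collect all key-values into a flat list, then count each distinct value via repeated list.count scans.
import Mathlib
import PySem

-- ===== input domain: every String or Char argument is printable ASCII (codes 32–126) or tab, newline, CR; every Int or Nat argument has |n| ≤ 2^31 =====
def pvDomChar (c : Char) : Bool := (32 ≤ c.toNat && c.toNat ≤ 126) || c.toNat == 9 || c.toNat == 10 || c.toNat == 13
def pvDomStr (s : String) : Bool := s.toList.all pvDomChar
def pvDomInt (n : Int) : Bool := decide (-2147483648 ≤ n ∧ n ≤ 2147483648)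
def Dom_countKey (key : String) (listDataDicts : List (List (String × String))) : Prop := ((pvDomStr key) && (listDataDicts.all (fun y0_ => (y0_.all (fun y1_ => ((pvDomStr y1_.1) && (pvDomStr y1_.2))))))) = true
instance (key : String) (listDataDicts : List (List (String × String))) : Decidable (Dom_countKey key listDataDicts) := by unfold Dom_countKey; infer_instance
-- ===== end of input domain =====

-- ===== PORT A =====
-- A: one pass building a counting dict with try/except (KeyError on a row missing key → excluded by Pre_).
def countKey (key : String) (listDataDicts : List (List (String × String))) : List (String × Int) :=
  (listDataDicts.foldl (fun outDict row =>
      match (PySem.Dict.mk row).get? key with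
      | none => outDict  -- Python raises KeyError here; such inputs are outside Pre_
      | some v =>
        match outDict.get? v with
        | some n => outDict.insert v (n + 1)   -- outDict[row[key]] += 1
        | none   => outDict.insert v 1         -- except KeyError: outDict[row[key]] = 1
    ) PySem.Dict.empty).items

-- ===== PORT B =====
-- B: build the flat list of key-values, then count each distinct value (first-occurrence order) by scanning.
def countKey_alt (key : String) (listDataDicts : List (List (String × String))) : List (String × Int) :=
  let vals := listDataDicts.map (fun row => ((PySem.Dict.mk row).get? key).getD "")
  (PySem.List.dedup vals).map (fun v => (v, (PySem.List.count vals v : Int)))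

-- ===== PRECONDITION & SPEC =====
-- Pre_ excludes rows lacking key, on which A raises KeyError (the except branch re-raises it).
def Pre_countKey (key : String) (listDataDicts : List (List (String × String))) : Prop :=
  ∀ row ∈ listDataDicts, key ∈ row.map Prod.fst
instance (key : String) (listDataDicts : List (List (String × String))) : Decidable (Pre_countKey key listDataDicts) := by unfold Pre_countKey; infer_instance
def pvWitness_countKey : String × (List (List (String × String))) :=
  ("k", [[("k", "a"), ("j", "x")], [("k", "b")], [("k", "a")]])
def Spec_countKey (key : String) (listDataDicts : List (List (String × String))) (out : List (String × Int)) : Prop := out = countKey_alt key listDataDicts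
instance (key : String) (listDataDicts : List (List (String × String))) (out : List (String × Int)) : Decidable (Spec_countKey key listDataDicts out) := by unfold Spec_countKey; infer_instance

-- ===== CLAIM (what is proved, stated in full; the proofs are below) =====
def Claim_equal_countKey : Prop := ∀ (key : String) (listDataDicts : List (List (String × String))), Dom_countKey key listDataDicts → Pre_countKey key listDataDicts → Spec_countKey key listDataDicts (countKey key listDataDicts)

-- ===== LEMMAS AND PROOFS =====

-- Under Pre_, the row lookup succeeds.
theorem row_lookup_isSome (key : String) (row : List (String × String))
    (h : key ∈ row.map Prod.fst) : ((PySem.Dict.mk row).get? key).isSome := by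
  induction row with
  | nil => simp at h
  | cons p t ih =>
    rw [PySem.Dict.get?_mk_cons]
    by_cases hk : p.1 = key
    · simp [hk]
    · simp only [List.map_cons, List.mem_cons] at h
      simp [show (p.1 == key) = false from by simpa using hk]
      exact ih (h.resolve_left (by intro he; exact hk he.symm))

-- A's loop, with every row containing key, is the standard counter loop over the looked-up values.
theorem countKey_foldl (key : String) (rows : List (List (String × String)))
    (hpre : ∀ row ∈ rows, key ∈ row.map Prod.fst) (d : PySem.Dict String Int) :
    rows.foldl (fun outDict row =>
      match (PySem.Dict.mk row).get? key with
      | none => outDict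
      | some v =>
        match outDict.get? v with
        | some n => outDict.insert v (n + 1)
        | none   => outDict.insert v 1) d =
    (rows.map (fun row => ((PySem.Dict.mk row).get? key).getD "")).foldl
      (fun d v => d.insert v (d.getD v 0 + 1)) d := by
  induction rows generalizing d with
  | nil => rfl
  | cons r t ih =>
    simp only [List.foldl_cons, List.map_cons]
    obtain ⟨v, hv⟩ := Option.isSome_iff_exists.mp
      (row_lookup_isSome key r (hpre r (by simp)))
    rw [hv]
    dsimp only
    have hstep : (match d.get? v with
        | some n => d.insert v (n + 1)
        | none   => d.insert v 1) = d.insert v (d.getD v 0 + 1) := by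
      cases hg : d.get? v with
      | none => simp [PySem.Dict.getD_eq_get?_getD, hg]
      | some n => simp [PySem.Dict.getD_eq_get?_getD, hg]
    rw [hstep]
    simp only [Option.getD_some]
    exact ih (fun row hrow => hpre row (by simp [hrow])) _

-- ===== VERDICT (by name: the statement is the Claim_ definition above) =====
theorem countKey_spec : Claim_equal_countKey := by
  intro key rows _ hpre
  unfold Spec_countKey countKey countKey_alt
  rw [countKey_foldl key rows hpre, PySem.Dict.foldl_insert_getD_add_one_eq_counter,
    PySem.Dict.items_counter]
  simp [PySem.List.count_eq, PySem.List.dedup_eq_ofList]
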